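-- pv_equiv track=rewrite | github.com/Yahara-Software/adventurer-journey-be | adventure_path.py | direction_splitter
-- ===== SOURCE A (Python) =====
-- def direction_splitter(directions, letter_options):
--     result_list = []
--     current_direction = {
--         "steps": "",
--         "direction": ""
--     }
--
--     for value in directions:
--         #check if value is a letter
--         if value in letter_options:
--             # if it is, append it to current_direction[direction]
--             #Append current_direction to result_list
--             #Reset current direction
--             current_direction["direction"] = value
--             result_list.append(current_direction)
--             current_direction = {
--                 "steps": "",
--                 "direction": ""
--             }
--         # else, we're still working on a direction
--             #append the value to current_direction[steps]
--             #append like a string for now, will convert to int later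
--         else:
--             current_direction["steps"] += value
--     return result_list
-- ===== SOURCE B (Python) =====
-- def direction_splitter(directions, letter_options):
--     letters = set(letter_options)
--     out = []
--     i = 0
--     n = len(directions)
--     while True:
--         j = i
--         while j < n and directions[j] not in letters:
--             j += 1
--         if j == n:
--             return out
--         out.append({"steps": directions[i:j], "direction": directions[j]})
--         i = j + 1
-- ===== Notes on version B (the rewrite author's own statement) =====
-- stated objective: faster
-- what changed: A maintains a mutable dict as a per-character state machine, scanning the letter list and growing the steps string by repeated concatenation per character; B scans for each direction letter with an index loop, slices the step characters before it in one operation, and looks letters up in a set built once.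
import Mathlib
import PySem

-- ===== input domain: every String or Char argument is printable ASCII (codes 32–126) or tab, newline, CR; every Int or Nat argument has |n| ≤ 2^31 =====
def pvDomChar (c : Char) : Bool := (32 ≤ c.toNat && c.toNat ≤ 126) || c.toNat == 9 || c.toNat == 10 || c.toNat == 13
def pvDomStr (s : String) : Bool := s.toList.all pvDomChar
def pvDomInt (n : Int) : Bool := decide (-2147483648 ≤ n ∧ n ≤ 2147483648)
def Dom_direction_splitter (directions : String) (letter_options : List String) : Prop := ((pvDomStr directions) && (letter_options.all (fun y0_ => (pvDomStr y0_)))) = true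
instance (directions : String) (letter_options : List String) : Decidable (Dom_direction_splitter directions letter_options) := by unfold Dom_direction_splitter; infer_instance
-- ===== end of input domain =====

-- B replaces A's per-character dict-accumulating state machine by a scan that finds each
-- direction letter and slices the step characters before it (letter lookup via a set); objective: alternative.


-- ===== PORT A =====
-- the dict literal {"steps": "", "direction": ""}
def aFreshDir : PySem.Dict String String :=
  PySem.Dict.ofList [("steps", ""), ("direction", "")]

-- one iteration of A's for-loop over `directions`; state = (result_list, current_direction)
def aStep (letter_options : List String)
    (st : List (List (String × String)) × PySem.Dict String String) (value : Char) :
    List (List (String × String)) × PySem.Dict String String :=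
  if String.ofList [value] ∈ letter_options then
    let cur := st.2.insert "direction" (String.ofList [value])
    (st.1 ++ [cur.items], aFreshDir)
  else
    (st.1, st.2.insert "steps" (st.2.getD "steps" "" ++ String.ofList [value]))

def direction_splitter (directions : String) (letter_options : List String) : List (List (String × String)) :=
  (directions.toList.foldl (aStep letter_options) ([], aFreshDir)).1

-- ===== PORT B =====
-- inner while loop of Source B: split the remaining characters at the first direction letter
def bSpan (letters : List String) : List Char → List Char × List Char
  | [] => ([], [])
  | c :: t =>
    if String.ofList [c] ∈ letters then ([], c :: t)
    else
      let (p, r) := bSpan letters t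
      (c :: p, r)

-- bSpan only splits the list (needed for termination of bLoop)
theorem bSpan_append (letters : List String) (l : List Char) :
    (bSpan letters l).1 ++ (bSpan letters l).2 = l := by
  induction l with
  | nil => simp [bSpan]
  | cons c t ih =>
    by_cases h : String.ofList [c] ∈ letters <;> simp [bSpan, h, ih]

-- outer while loop of Source B
def bLoop (letters : List String) (l : List Char) : List (List (String × String)) :=
  match h : bSpan letters l with
  | (_, []) => []
  | (p, c :: t) =>
    [("steps", String.ofList p), ("direction", String.ofList [c])] :: bLoop letters t
termination_by l.length
decreasing_by
  have := bSpan_append letters l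
  rw [h] at this
  simp only [← this, List.length_append, List.length_cons]
  omega

def direction_splitter_alt (directions : String) (letter_options : List String) : List (List (String × String)) :=
  bLoop (PySem.Set.ofList letter_options) directions.toList

-- ===== PRECONDITION & SPEC =====
def Spec_direction_splitter (directions : String) (letter_options : List String) (out : List (List (String × String))) : Prop := out = direction_splitter_alt directions letter_options
instance (directions : String) (letter_options : List String) (out : List (List (String × String))) : Decidable (Spec_direction_splitter directions letter_options out) := by unfold Spec_direction_splitter; infer_instance

-- ===== CLAIM (what is proved, stated in full; the proofs are below) =====
def Claim_equal_direction_splitter : Prop := ∀ (directions : String) (letter_options : List String), Dom_direction_splitter directions letter_options → Spec_direction_splitter directions letter_options (direction_splitter directions letter_options)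

-- ===== LEMMAS AND PROOFS =====

-- A's current_direction dict is always {"steps": v, "direction": ""}; its three dict operations computed:
theorem aFreshDir_eq : aFreshDir = (⟨[("steps", ""), ("direction", "")]⟩ : PySem.Dict String String) := by
  decide

theorem dict_insert_direction (v x : String) :
    ((⟨[("steps", v), ("direction", "")]⟩ : PySem.Dict String String).insert "direction" x).items
      = [("steps", v), ("direction", x)] := by
  simp [PySem.Dict.insert, PySem.Dict.contains]

theorem dict_insert_steps (v w y : String) :
    (⟨[("steps", v), ("direction", w)]⟩ : PySem.Dict String String).insert "steps" y
      = (⟨[("steps", y), ("direction", w)]⟩ : PySem.Dict String String) := by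
  simp [PySem.Dict.insert, PySem.Dict.contains]

theorem dict_getD_steps (v w : String) :
    (⟨[("steps", v), ("direction", w)]⟩ : PySem.Dict String String).getD "steps" "" = v := by
  simp [PySem.Dict.getD_eq_get?_getD, PySem.Dict.get?_mk_cons]

-- reference recursion: what A's fold appends when the pending steps string is s
def goA (letter_options : List String) (s : List Char) : List Char → List (List (String × String))
  | [] => []
  | c :: t =>
    if String.ofList [c] ∈ letter_options then
      [("steps", String.ofList s), ("direction", String.ofList [c])] :: goA letter_options [] t
    else goA letter_options (s ++ [c]) t

theorem foldl_aStep_eq_goA (letter_options : List String) (l : List Char)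
    (res : List (List (String × String))) (s : List Char) :
    (l.foldl (aStep letter_options)
        (res, (⟨[("steps", String.ofList s), ("direction", "")]⟩ : PySem.Dict String String))).1
      = res ++ goA letter_options s l := by
  induction l generalizing res s with
  | nil => simp [goA]
  | cons c t ih =>
    by_cases h : String.ofList [c] ∈ letter_options
    · simp only [List.foldl_cons, aStep, h, if_pos]
      rw [dict_insert_direction]
      have hfresh : aFreshDir
          = (⟨[("steps", String.ofList []), ("direction", "")]⟩ : PySem.Dict String String) := by
        rw [aFreshDir_eq]
      rw [hfresh, ih]
      simp [goA, h]
    · simp only [List.foldl_cons, aStep, h, if_neg, not_false_iff]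
      rw [dict_getD_steps, dict_insert_steps]
      have hs : String.ofList s ++ String.ofList [c] = String.ofList (s ++ [c]) := by
        simp [pysem]
      rw [hs, ih]
      simp [goA, h]

-- goA over a block split by bSpan (the two ports' membership tests agree by PySem.Set.mem_ofList)
theorem goA_bSpan (lo : List String) (l : List Char) (s : List Char) :
    goA lo s l =
      match bSpan (PySem.Set.ofList lo) l with
      | (_, []) => []
      | (p, c :: t) =>
        [("steps", String.ofList (s ++ p)), ("direction", String.ofList [c])] :: goA lo [] t := by
  induction l generalizing s with
  | nil => simp [goA, bSpan]
  | cons c t ih =>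
    by_cases h : String.ofList [c] ∈ lo
    · have h' : String.ofList [c] ∈ PySem.Set.ofList lo := (PySem.Set.mem_ofList lo _).mpr h
      simp [goA, bSpan, h, h']
    · have h' : String.ofList [c] ∉ PySem.Set.ofList lo :=
        fun hc => h ((PySem.Set.mem_ofList lo _).mp hc)
      simp only [goA, bSpan, h, h', if_neg, not_false_iff]
      rw [ih (s ++ [c])]
      rcases hsp : bSpan (PySem.Set.ofList lo) t with ⟨p, r⟩
      cases r <;> simp

theorem goA_eq_bLoop (lo : List String) (l : List Char) :
    goA lo [] l = bLoop (PySem.Set.ofList lo) l := by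
  induction hn : l.length using Nat.strong_induction_on generalizing l with
  | _ n ih =>
    rw [goA_bSpan lo l []]
    rw [bLoop]
    rcases hsp : bSpan (PySem.Set.ofList lo) l with ⟨p, r⟩
    cases r with
    | nil => simp
    | cons c t =>
      simp only [List.nil_append]
      have hlen : t.length < n := by
        have := bSpan_append (PySem.Set.ofList lo) l
        rw [hsp] at this
        subst hn
        simp only [← this, List.length_append, List.length_cons]
        omega
      rw [ih t.length hlen t rfl]

-- ===== VERDICT (by name: the statement is the Claim_ definition above) =====
theorem direction_splitter_spec : Claim_equal_direction_splitter := by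
  intro directions letter_options _
  unfold Spec_direction_splitter direction_splitter direction_splitter_alt
  have h0 : aFreshDir
      = (⟨[("steps", String.ofList []), ("direction", "")]⟩ : PySem.Dict String String) := by
    rw [aFreshDir_eq]
  rw [h0, foldl_aStep_eq_goA, goA_eq_bLoop]
  simp
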